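-- pv_equiv track=rewrite | github.com/endryha/AlgoPlayground | 6_binary_search/3_cut_wood.py | cutting_wood
-- ===== SOURCE A (Python) =====
-- from typing import List
--
-- def cutting_wood(heights: List[int], min_cut_length: int) -> int:
--     left, right = 0, max(heights)
--     result = -1
--
--     while left <= right:
--         height = (left + right) // 2
--         wood_cut_count = count_wood_cut(heights, height)
--
--         if wood_cut_count >= min_cut_length:
--             result = height
--             left = height + 1
--         else:
--             right = height - 1
--
--     return result
--
-- def count_wood_cut(heights: List[int], cut_height: int) -> int:
--     wood_collected = 0
--
--     for height in heights:
--         if height > cut_height: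
--             wood_collected += height - cut_height
--
--     return wood_collected
-- ===== SOURCE B (Python) =====
-- def cutting_wood(heights, min_cut_length):
--     M = max(heights)
--     if min_cut_length <= 0:
--         return M if M >= 0 else -1
--     pos = sorted((x for x in heights if x > 0), reverse=True)
--     n = len(pos)
--     P = 0
--     for k in range(1, n + 1):
--         P += pos[k - 1]
--         lower = pos[k] if k < n else 0
--         h = (P - min_cut_length) // k
--         if h >= lower:
--             return h
--     return -1
-- ===== Notes on version B (the rewrite author's own statement) =====
-- stated objective: faster
-- what changed: A binary-searches the cut height, recounting the harvested wood over the whole list at every probe; B sorts the heights descending once and walks the prefix sums, solving the piecewise-linear inequality sum(top k) - k*h >= m exactly with one floor division per segment.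
import Mathlib
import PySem

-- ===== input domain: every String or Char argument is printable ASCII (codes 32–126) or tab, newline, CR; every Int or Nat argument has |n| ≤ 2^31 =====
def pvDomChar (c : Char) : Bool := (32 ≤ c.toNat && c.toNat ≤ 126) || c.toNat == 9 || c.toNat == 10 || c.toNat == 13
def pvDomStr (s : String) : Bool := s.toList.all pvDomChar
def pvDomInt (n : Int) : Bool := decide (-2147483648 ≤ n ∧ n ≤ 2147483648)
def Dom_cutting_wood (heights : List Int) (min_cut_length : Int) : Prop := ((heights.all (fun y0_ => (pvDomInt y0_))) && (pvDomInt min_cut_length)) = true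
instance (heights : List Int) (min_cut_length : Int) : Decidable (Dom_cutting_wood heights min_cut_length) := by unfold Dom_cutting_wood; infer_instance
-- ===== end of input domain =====

-- B replaces A's O(n·log(max)) binary search on the cut height by one sort + a single
-- prefix-sum pass that solves the piecewise-linear equation exactly (objective: faster).

-- ===== PORT A =====
def count_wood_cut (heights : List Int) (cut_height : Int) : Int :=
  heights.foldl (fun wood_collected height =>
    if height > cut_height then wood_collected + (height - cut_height) else wood_collected) 0

def cwLoop (heights : List Int) (min_cut_length : Int) (left right result : Int) : Int :=
  if hlr : left ≤ right then
    let height := PySem.Int.floordiv (left + right) 2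
    if count_wood_cut heights height ≥ min_cut_length then
      cwLoop heights min_cut_length (height + 1) right height
    else
      cwLoop heights min_cut_length left (height - 1) result
  else result
termination_by (right + 1 - left).toNat
decreasing_by
  all_goals
    have := PySem.Int.floordiv_two_mid_bounds (lo := left) (hi := right) hlr
    omega

def cutting_wood (heights : List Int) (min_cut_length : Int) : Int :=
  cwLoop heights min_cut_length 0 ((PySem.List.max? heights (fun y => y)).getD 0) (-1)

-- ===== PORT B =====
-- the for-loop of Source B: rest = pos[k-1:], P = sum of the consumed prefix before this step
def altScan (min_cut_length : Int) (rest : List Int) (k P : Int) : Int :=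
  match rest with
  | [] => -1
  | x :: rest' =>
    let P' := P + x
    let lower := match rest' with
      | [] => 0          -- k = len(pos): lower = 0
      | y :: _ => y      -- pos[k]
    let h := PySem.Int.floordiv (P' - min_cut_length) k
    if h ≥ lower then h else altScan min_cut_length rest' (k + 1) P'

def cutting_wood_alt (heights : List Int) (min_cut_length : Int) : Int :=
  let M := (PySem.List.max? heights (fun y => y)).getD 0
  if min_cut_length ≤ 0 then (if M ≥ 0 then M else -1)
  else
    altScan min_cut_length
      (PySem.List.sorted (heights.filter (fun x => decide (0 < x))) (fun y => y) true) 1 0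

-- ===== PRECONDITION & SPEC =====
-- Pre_ excludes only the empty list, on which Python's max(heights) raises ValueError.
def Pre_cutting_wood (heights : List Int) (min_cut_length : Int) : Prop := heights ≠ []
instance (heights : List Int) (min_cut_length : Int) : Decidable (Pre_cutting_wood heights min_cut_length) := by unfold Pre_cutting_wood; infer_instance

def pvWitness_cutting_wood : List Int × Int := ([5, 3, 1], 4)

def Spec_cutting_wood (heights : List Int) (min_cut_length : Int) (out : Int) : Prop := out = cutting_wood_alt heights min_cut_length
instance (heights : List Int) (min_cut_length : Int) (out : Int) : Decidable (Spec_cutting_wood heights min_cut_length out) := by unfold Spec_cutting_wood; infer_instance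

-- ===== CLAIM (what is proved, stated in full; the proofs are below) =====
def Claim_equal_cutting_wood : Prop := ∀ (heights : List Int) (min_cut_length : Int), Dom_cutting_wood heights min_cut_length → Pre_cutting_wood heights min_cut_length → Spec_cutting_wood heights min_cut_length (cutting_wood heights min_cut_length)

-- ===== LEMMAS AND PROOFS =====

-- `Good heights m M v` characterises the answer: v is the largest cut height in [0, M]
-- harvesting at least m, or -1 if there is none.
def Good (heights : List Int) (m M v : Int) : Prop :=
  -1 ≤ v ∧ (0 ≤ v → v ≤ M ∧ m ≤ count_wood_cut heights v) ∧
    ∀ t, v < t → t ≤ M → count_wood_cut heights t < m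

lemma cwc_foldl_shift (l : List Int) (t c : Int) :
    l.foldl (fun w h => if h > t then w + (h - t) else w) c
      = c + l.foldl (fun w h => if h > t then w + (h - t) else w) 0 := by
  induction l generalizing c with
  | nil => simp
  | cons x xs ih =>
    simp only [List.foldl_cons]
    rw [ih, ih (if x > t then 0 + (x - t) else 0)]
    split_ifs <;> ring

lemma cwc_cons (x : Int) (l : List Int) (t : Int) :
    count_wood_cut (x :: l) t = (if t < x then x - t else 0) + count_wood_cut l t := by
  show (x :: l).foldl _ _ = _
  simp only [List.foldl_cons]
  rw [cwc_foldl_shift]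
  unfold count_wood_cut
  split_ifs with h1 <;> simp

lemma cwc_append (l1 l2 : List Int) (t : Int) :
    count_wood_cut (l1 ++ l2) t = count_wood_cut l1 t + count_wood_cut l2 t := by
  induction l1 with
  | nil => simp [count_wood_cut]
  | cons x xs ih =>
    rw [List.cons_append, cwc_cons, cwc_cons, ih]
    ring

lemma cwc_nonneg (l : List Int) (t : Int) : 0 ≤ count_wood_cut l t := by
  induction l with
  | nil => simp [count_wood_cut]
  | cons x xs ih => rw [cwc_cons]; split_ifs <;> omega

lemma cwc_antitone (l : List Int) {t s : Int} (h : t ≤ s) :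
    count_wood_cut l s ≤ count_wood_cut l t := by
  induction l with
  | nil => simp [count_wood_cut]
  | cons x xs ih => rw [cwc_cons, cwc_cons]; split_ifs <;> omega

lemma cwc_eq_zero (l : List Int) (t : Int) (h : ∀ x ∈ l, x ≤ t) :
    count_wood_cut l t = 0 := by
  induction l with
  | nil => simp [count_wood_cut]
  | cons x xs ih =>
    rw [cwc_cons]
    have hx := h x (by simp)
    rw [if_neg (by omega), ih (fun y hy => h y (by simp [hy]))]
    ring

lemma cwc_eq_linear (l : List Int) (t : Int) (h : ∀ x ∈ l, t ≤ x) :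
    count_wood_cut l t = l.sum - l.length * t := by
  induction l with
  | nil => simp [count_wood_cut]
  | cons x xs ih =>
    rw [cwc_cons, ih (fun y hy => h y (by simp [hy]))]
    have hx := h x (by simp)
    simp only [List.sum_cons, List.length_cons]
    split_ifs with h1
    · push_cast; ring
    · have hxt : x = t := by omega
      subst hxt
      push_cast; ring

lemma cwc_ge_linear (l : List Int) (t : Int) :
    l.sum - l.length * t ≤ count_wood_cut l t := by
  induction l with
  | nil => simp [count_wood_cut]
  | cons x xs ih =>
    rw [cwc_cons]
    simp only [List.sum_cons, List.length_cons]
    push_cast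
    split_ifs <;> nlinarith [ih]

lemma cwc_perm {l l' : List Int} (h : l.Perm l') (t : Int) :
    count_wood_cut l t = count_wood_cut l' t := by
  induction h with
  | nil => rfl
  | cons x _ ih => rw [cwc_cons, cwc_cons, ih]
  | swap x y l => rw [cwc_cons, cwc_cons, cwc_cons, cwc_cons]; ring
  | trans _ _ ih1 ih2 => rw [ih1, ih2]

lemma cwc_filter (l : List Int) (t : Int) (ht : 0 ≤ t) :
    count_wood_cut l t = count_wood_cut (l.filter (fun x => decide (0 < x))) t := by
  induction l with
  | nil => simp [count_wood_cut]
  | cons x xs ih =>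
    rw [cwc_cons]
    by_cases hx : 0 < x
    · simp only [List.filter_cons, decide_eq_true_eq, if_pos hx]
      rw [cwc_cons, ih]
    · simp only [List.filter_cons, decide_eq_true_eq, if_neg hx]
      rw [if_neg (by omega), ih]; omega

lemma good_unique {heights : List Int} {m M v1 v2 : Int}
    (h1 : Good heights m M v1) (h2 : Good heights m M v2) : v1 = v2 := by
  rcases h1 with ⟨hl1, hv1, ht1⟩
  rcases h2 with ⟨hl2, hv2, ht2⟩
  by_contra hne
  rcases lt_trichotomy v1 v2 with h | h | h
  · obtain ⟨hle, hf⟩ := hv2 (by omega)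
    have := ht1 v2 h hle; omega
  · exact hne h
  · obtain ⟨hle, hf⟩ := hv1 (by omega)
    have := ht2 v1 h hle; omega

lemma cwLoop_good (heights : List Int) (m M : Int) :
    ∀ left right result : Int, 0 ≤ left → left ≤ right + 1 → right ≤ M →
      (0 < left → m ≤ count_wood_cut heights (left - 1)) →
      (right < M → count_wood_cut heights (right + 1) < m) →
      result = left - 1 →
      Good heights m M (cwLoop heights m left right result) := by
  intro left right result
  induction left, right, result using cwLoop.induct heights m with
  | case1 l r res hlr mid hge ih =>
    intro h0 h1 h2 hL hR hres
    have hmid := PySem.Int.floordiv_two_mid_bounds (lo := l) (hi := r) hlr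
    rw [cwLoop, dif_pos hlr]
    change Good heights m M (if count_wood_cut heights mid ≥ m then
      cwLoop heights m (mid + 1) r mid else cwLoop heights m l (mid - 1) res)
    rw [if_pos hge]
    apply ih (by omega) (by omega) h2
    · intro _
      simpa using hge
    · exact hR
    · omega
  | case2 l r res hlr mid hlt ih =>
    intro h0 h1 h2 hL hR hres
    have hmid := PySem.Int.floordiv_two_mid_bounds (lo := l) (hi := r) hlr
    rw [cwLoop, dif_pos hlr]
    change Good heights m M (if count_wood_cut heights mid ≥ m then
      cwLoop heights m (mid + 1) r mid else cwLoop heights m l (mid - 1) res)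
    rw [if_neg hlt]
    apply ih h0 (by omega) (by omega) hL
    · intro _
      simpa using lt_of_not_ge hlt
    · exact hres
  | case3 l r res hlr =>
    intro h0 h1 h2 hL hR hres
    rw [cwLoop, dif_neg hlr]
    refine ⟨by omega, fun hr => ⟨by omega, ?_⟩, fun t ht htM => ?_⟩
    · have := hL (by omega)
      have : l - 1 = res := by omega
      rw [← this]
      exact hL (by omega)
    · have hrM : r < M := by omega
      have h1' : count_wood_cut heights (r + 1) < m := by
        have := hR hrM
        omega
      calc count_wood_cut heights t ≤ count_wood_cut heights (r + 1) :=
            cwc_antitone heights (by omega)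
        _ < m := h1'


lemma cutting_wood_good (heights : List Int) (m M : Int)
    (hM : PySem.List.max? heights (fun y => y) = some M) :
    Good heights m M (cutting_wood heights m) := by
  have hub : ∀ x ∈ heights, x ≤ M := fun x hx => PySem.List.max?_isMax hM x hx
  unfold cutting_wood
  rw [hM]
  simp only [Option.getD_some]
  by_cases hM0 : 0 ≤ M
  · apply cwLoop_good heights m M 0 M (-1) le_rfl (by omega) le_rfl
    · intro h; omega
    · intro h; omega
    · omega
  · rw [cwLoop, dif_neg (by omega)]
    exact ⟨le_rfl, fun h => by omega, fun t ht htM => by omega⟩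


lemma altScan_cons (m x k P : Int) (rest' : List Int) : altScan m (x :: rest') k P
    = if PySem.Int.floordiv (P + x - m) k ≥ rest'.headD 0
      then PySem.Int.floordiv (P + x - m) k
      else altScan m rest' (k + 1) (P + x) := by
  rw [altScan.eq_def]
  cases rest' <;> rfl

lemma headD_nonneg (l : List Int) (h : ∀ y ∈ l, 0 < y) : 0 ≤ l.headD 0 := by
  cases l with
  | nil => simp
  | cons z tl => have := h z (by simp); simpa using this.le

lemma le_headD (l : List Int) (h : l.Pairwise (fun a b : Int => b ≤ a)) :
    ∀ y ∈ l, y ≤ l.headD 0 := by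
  cases l with
  | nil => simp
  | cons z tl =>
    intro y hy
    rcases List.mem_cons.mp hy with hy | hy
    · simp [hy]
    · simpa using (List.pairwise_cons.mp h).1 y hy

lemma headD_le (l : List Int) (t : Int) (h : ∀ y ∈ l, y ≤ t) (ht : 0 ≤ t) :
    l.headD 0 ≤ t := by
  cases l with
  | nil => simpa using ht
  | cons z tl => simpa using h z (by simp)

lemma altScan_good (heights : List Int) (m M : Int) (hub : ∀ x ∈ heights, x ≤ M)
    (hm : 1 ≤ m) :
    ∀ (rest pre : List Int),
      (pre ++ rest).Pairwise (fun a b => b ≤ a) →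
      (∀ y ∈ pre ++ rest, 0 < y) →
      (∀ t, 0 ≤ t → count_wood_cut heights t = count_wood_cut (pre ++ rest) t) →
      (∀ t, 0 ≤ t → (∀ y ∈ rest, y ≤ t) → count_wood_cut heights t < m) →
      Good heights m M (altScan m rest ((pre.length : Int) + 1) pre.sum) := by
  intro rest
  induction rest with
  | nil =>
    intro pre hsort hpos hEQ hINV
    refine ⟨by simp [altScan], by simp [altScan], fun t ht htM => ?_⟩
    have h1 : altScan m [] ((pre.length : Int) + 1) pre.sum = -1 := by simp [altScan]
    rw [h1] at ht
    exact hINV t (by omega) (by simp)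
  | cons x rest' ih =>
    intro pre hsort hpos hEQ hINV
    -- names for the quantities of this loop step
    set k : Int := (pre.length : Int) + 1 with hk
    set P' : Int := pre.sum + x with hP'defn
    set lw : Int := rest'.headD 0 with hlwdefn
    set h : Int := PySem.Int.floordiv (P' - m) k with hhdefn
    have hkpos : 0 < k := by have := Int.natCast_nonneg pre.length; omega
    have hdm := PySem.Int.floordiv_mul_add_mod (P' - m) k
    have hr0 : 0 ≤ PySem.Int.mod (P' - m) k := PySem.Int.mod_nonneg _ hkpos
    have hrk : PySem.Int.mod (P' - m) k < k := PySem.Int.mod_lt _ hkpos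
    set r : Int := PySem.Int.mod (P' - m) k with hrdefn
    -- order facts from sortedness / positivity
    have hpair := List.pairwise_append.mp hsort
    have hpre_ge_x : ∀ z ∈ pre, x ≤ z := fun z hz => hpair.2.2 z hz x (by simp)
    have hx_rest : ∀ y ∈ rest', y ≤ x := fun y hy =>
      (List.pairwise_cons.mp hpair.2.1).1 y hy
    have hlow0 : 0 ≤ lw :=
      headD_nonneg rest' (fun y hy => hpos y (by simp [hy]))
    have hrest_le_lw : ∀ y ∈ rest', y ≤ lw :=
      le_headD rest' (List.pairwise_cons.mp hpair.2.1).2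
    have hlw_le : ∀ t : Int, (∀ y ∈ rest', y ≤ t) → 0 ≤ t → lw ≤ t :=
      fun t hall ht => headD_le rest' t hall ht
    -- the exact linear value of the wood count below x
    have key : ∀ t : Int, 0 ≤ t → (∀ y ∈ rest', y ≤ t) → t < x →
        count_wood_cut heights t = P' - k * t := by
      intro t ht hrt htx
      rw [hEQ t ht]
      have hsplit : pre ++ x :: rest' = (pre ++ [x]) ++ rest' := by simp
      rw [hsplit, cwc_append, cwc_eq_zero rest' t hrt,
        cwc_eq_linear (pre ++ [x]) t (by
          intro z hz
          rcases List.mem_append.mp hz with hz | hz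
          · have := hpre_ge_x z hz; omega
          · simp at hz; omega)]
      simp only [List.sum_append, List.length_append, List.sum_cons,
        List.sum_nil, List.length_cons, List.length_nil]
      push_cast
      ring
    -- everything at height ≥ h+1 is below the threshold
    have key2 : ∀ t : Int, h + 1 ≤ t → 0 ≤ t → (∀ y ∈ rest', y ≤ t) →
        count_wood_cut heights t < m := by
      intro t hht ht hrt
      by_cases htx : t < x
      · rw [key t ht hrt htx]
        have hkt : k * (h + 1) ≤ k * t := mul_le_mul_of_nonneg_left (by omega) hkpos.le
        nlinarith [hdm, hrk]
      · refine hINV t ht ?_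
        intro y hy
        rcases List.mem_cons.mp hy with hy | hy
        · omega
        · have := hx_rest y hy; omega
    -- one unfolding of the loop body
    rw [altScan_cons, ← hP'defn, ← hhdefn, ← hlwdefn]
    split_ifs with hge
    · -- Source B returns h here
      refine ⟨by omega, fun h0 => ?_, fun t htp htM => ?_⟩
      · have hfh : m ≤ count_wood_cut heights h := by
          have hEQh := hEQ h h0
          have hsplit : pre ++ x :: rest' = (pre ++ [x]) ++ rest' := by simp
          rw [hsplit, cwc_append] at hEQh
          have hge1 := cwc_ge_linear (pre ++ [x]) h
          have hge2 := cwc_nonneg rest' h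
          simp only [List.sum_append, List.length_append, List.sum_cons,
            List.sum_nil, List.length_cons, List.length_nil] at hge1
          push_cast at hge1
          nlinarith [hdm]
        refine ⟨?_, hfh⟩
        by_contra hMh
        have : count_wood_cut heights h = 0 :=
          cwc_eq_zero heights h (fun z hz => by have := hub z hz; omega)
        omega
      · exact key2 t (by omega) (by omega) (fun y hy => by have := hrest_le_lw y hy; omega)
    · -- recurse: the invariant moves to pre ++ [x]
      have hlen : ((pre ++ [x]).length : Int) + 1 = k + 1 := by
        simp only [List.length_append, List.length_cons, List.length_nil]
        push_cast; omega
      have hsum : (pre ++ [x]).sum = P' := by simp [hP'defn]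
      have := ih (pre ++ [x])
        (by rw [List.append_assoc]; simpa using hsort)
        (by intro y hy; refine hpos y ?_; rw [List.append_assoc] at hy; simpa using hy)
        (by intro t ht; rw [hEQ t ht, List.append_assoc]; simp)
        (by
          intro t ht hrt
          refine key2 t ?_ ht hrt
          have := hlw_le t hrt ht
          omega)
      rw [hlen, hsum] at this
      exact this


lemma alt_good (heights : List Int) (m M : Int)
    (hM : PySem.List.max? heights (fun y => y) = some M) :
    Good heights m M (cutting_wood_alt heights m) := by
  have hub : ∀ x ∈ heights, x ≤ M := fun x hx => PySem.List.max?_isMax hM x hx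
  unfold cutting_wood_alt
  rw [hM]
  simp only [Option.getD_some]
  by_cases hm : m ≤ 0
  · rw [if_pos hm]
    by_cases hM0 : M ≥ 0
    · rw [if_pos hM0]
      exact ⟨by omega, fun _ => ⟨le_rfl, by rw [cwc_eq_zero heights M hub]; omega⟩,
        fun t ht htM => by omega⟩
    · rw [if_neg hM0]
      exact ⟨le_rfl, by omega, fun t ht htM => by omega⟩
  · rw [if_neg hm]
    have hposEq : ∀ t : Int, 0 ≤ t → count_wood_cut heights t
        = count_wood_cut (PySem.List.sorted (heights.filter (fun x => decide (0 < x)))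
            (fun y => y) true) t := by
      intro t ht
      rw [cwc_filter heights t ht]
      exact (cwc_perm (PySem.List.sorted_perm _ _ _) t).symm
    have := altScan_good heights m M hub (by omega)
      (PySem.List.sorted (heights.filter (fun x => decide (0 < x))) (fun y => y) true) []
      (by simpa using PySem.List.sorted_pairwise_rev _ _)
      (by
        intro y hy
        simp only [List.nil_append] at hy
        have := (PySem.List.mem_sorted _ _ _ _).mp hy
        simp only [List.mem_filter, decide_eq_true_eq] at this
        exact this.2)
      (by intro t ht; simpa using hposEq t ht)
      (by
        intro t ht hall
        rw [hposEq t ht, cwc_eq_zero _ t hall]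
        omega)
    simpa using this


-- ===== VERDICT (by name: the statement is the Claim_ definition above) =====
theorem cutting_wood_spec : Claim_equal_cutting_wood := by
  intro heights m _dom hpre
  unfold Spec_cutting_wood
  obtain ⟨M, hM⟩ : ∃ M, PySem.List.max? heights (fun y => y) = some M := by
    cases hEq : PySem.List.max? heights (fun y => y) with
    | none => exact absurd ((PySem.List.max?_eq_none_iff heights (fun y => y)).mp hEq) hpre
    | some M => exact ⟨M, rfl⟩
  exact good_unique (cutting_wood_good heights m M hM) (alt_good heights m M hM)
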